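-- pv_equiv track=rewrite | github.com/mnvtrvd/sv2fsm | sv_parser.py | combine_transitions
-- ===== SOURCE A (Python) =====
-- def combine_transitions(transitions):
--     combined = {}
--     for c, t in transitions:
--         if c in combined:
--             combined[c] = combined[c] + " || (" + t
--         elif t != "":
--             combined[c] = "(" + t + ")"
--         else:
--             combined[c] = ""
--
--     return combined
-- ===== SOURCE B (Python) =====
-- def combine_transitions(transitions):
--     groups = {}
--     for c, t in transitions:
--         groups.setdefault(c, []).append(t)
--     combined = {}
--     for c, ts in groups.items():
--         s = "(" + ts[0] + ")" if ts[0] != "" else ""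
--         for t in ts[1:]:
--             s = s + " || (" + t
--         combined[c] = s
--     return combined
-- ===== Notes on version B (the rewrite author's own statement) =====
-- stated objective: alternative
-- what changed: Replaces A's single loop that branches per transition to mutate the accumulated condition string with a two-pass decomposition: first group each key's condition values into lists (setdefault/append), then render each group once (parenthesised head, with the empty-first-value special case, then fold the ' || (' appends).
import Mathlib
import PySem

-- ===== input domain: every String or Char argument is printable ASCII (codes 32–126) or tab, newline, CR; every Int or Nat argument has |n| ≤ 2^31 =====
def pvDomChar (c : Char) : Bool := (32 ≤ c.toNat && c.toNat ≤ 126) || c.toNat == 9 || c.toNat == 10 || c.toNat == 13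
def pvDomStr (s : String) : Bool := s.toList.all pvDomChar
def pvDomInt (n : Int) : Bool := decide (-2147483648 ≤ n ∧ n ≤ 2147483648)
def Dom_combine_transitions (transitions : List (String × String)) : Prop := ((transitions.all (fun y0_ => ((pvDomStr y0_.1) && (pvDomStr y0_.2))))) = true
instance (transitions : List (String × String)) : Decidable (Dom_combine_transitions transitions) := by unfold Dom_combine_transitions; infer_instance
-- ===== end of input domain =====

-- B replaces A's single branching accumulation loop by a group-then-render decomposition
-- (first collect each key's values, then render each group once); objective: alternative, same cost.

-- ===== PORT A =====
def combine_transitions (transitions : List (String × String)) : List (String × String) :=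
  (transitions.foldl (fun d p =>
      if d.contains p.1 then d.insert p.1 (d.getD p.1 "" ++ " || (" ++ p.2)
      else if p.2 ≠ "" then d.insert p.1 ("(" ++ p.2 ++ ")")
      else d.insert p.1 "") PySem.Dict.empty).items

-- ===== PORT B =====
-- Source B's inner rendering loop for one group ([] case is unreachable: groups' values are nonempty)
def pvRender (ts : List String) : String :=
  match ts with
  | [] => ""
  | t0 :: rest =>
      rest.foldl (fun s t => s ++ " || (" ++ t)
        (if t0 ≠ "" then "(" ++ t0 ++ ")" else "")

def combine_transitions_alt (transitions : List (String × String)) : List (String × String) :=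
  -- first pass: groups.setdefault(c, []).append(t)
  let groups := transitions.foldl (fun d p => d.modify p.1 [] (· ++ [p.2])) PySem.Dict.empty
  -- second pass: render each group
  (groups.items.foldl (fun out q => out.insert q.1 (pvRender q.2)) PySem.Dict.empty).items

-- ===== PRECONDITION & SPEC =====
def Spec_combine_transitions (transitions : List (String × String)) (out : List (String × String)) : Prop := out = combine_transitions_alt transitions
instance (transitions : List (String × String)) (out : List (String × String)) : Decidable (Spec_combine_transitions transitions out) := by unfold Spec_combine_transitions; infer_instance

-- ===== CLAIM (what is proved, stated in full; the proofs are below) =====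
def Claim_equal_combine_transitions : Prop := ∀ (transitions : List (String × String)), Dom_combine_transitions transitions → Spec_combine_transitions transitions (combine_transitions transitions)

-- ===== LEMMAS AND PROOFS =====

-- A's per-step new value at a key, as a function of the key's previous value (none = key absent).
def pvValA (o : Option String) (t : String) : String :=
  match o with
  | some s => s ++ " || (" ++ t
  | none => if t ≠ "" then "(" ++ t ++ ")" else ""

-- A's fold step is a single insert of pvValA.
theorem pvStepA_eq :
    (fun (d : PySem.Dict String String) (p : String × String) =>
      if d.contains p.1 then d.insert p.1 (d.getD p.1 "" ++ " || (" ++ p.2)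
      else if p.2 ≠ "" then d.insert p.1 ("(" ++ p.2 ++ ")")
      else d.insert p.1 "")
    = fun d p => d.insert p.1 (pvValA (d.get? p.1) p.2) := by
  funext d p
  rw [PySem.Dict.contains_eq_isSome_get?, PySem.Dict.getD_eq_get?_getD]
  cases hg : d.get? p.1 with
  | some s => simp [pvValA]
  | none =>
    simp only [pvValA, Option.isSome_none, Bool.false_eq_true, if_false, ne_eq, ite_not]
    split_ifs <;> rfl

def pvAccA (o : Option String) (ts : List String) : Option String :=
  ts.foldl (fun o t => some (pvValA o t)) o

theorem pvAccA_some (ts : List String) : ∀ s : String,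
    pvAccA (some s) ts = some (ts.foldl (fun s t => s ++ " || (" ++ t) s) := by
  induction ts with
  | nil => intro s; rfl
  | cons t ts ih => intro s; simpa [pvAccA, pvValA, List.foldl] using ih (s ++ " || (" ++ t)

theorem pvAccA_none (t0 : String) (ts : List String) :
    pvAccA none (t0 :: ts)
      = some (ts.foldl (fun s t => s ++ " || (" ++ t)
          (if t0 ≠ "" then "(" ++ t0 ++ ")" else "")) := by
  simpa [pvAccA, pvValA, List.foldl] using pvAccA_some ts (pvValA none t0)

-- A's loop, looked up at a key, is pvAccA over that key's values in order.
theorem pvGetA (l : List (String × String)) : ∀ (d : PySem.Dict String String) (c : String),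
    (l.foldl (fun d p => d.insert p.1 (pvValA (d.get? p.1) p.2)) d).get? c
      = pvAccA (d.get? c) ((l.filter (fun p => p.1 == c)).map (·.2)) := by
  induction l with
  | nil => intro d c; rfl
  | cons p l ih =>
    intro d c
    by_cases h : p.1 = c
    · subst h
      simp [List.foldl, ih, PySem.Dict.get?_insert_self, pvAccA]
    · simp [List.foldl, ih, PySem.Dict.get?_insert_of_ne _ _ (Ne.symm h), h]

theorem combine_transitions_eq (transitions : List (String × String)) :
    combine_transitions transitions = combine_transitions_alt transitions := by
  unfold combine_transitions combine_transitions_alt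
  dsimp only
  rw [pvStepA_eq]
  set dA := transitions.foldl (fun d p => d.insert p.1 (pvValA (d.get? p.1) p.2)) PySem.Dict.empty with hdA
  set g := transitions.foldl (fun d p => d.modify p.1 [] (· ++ [p.2])) PySem.Dict.empty with hg
  have hkA : dA.keys = PySem.Set.ofList (transitions.map (·.1)) := by
    rw [hdA, PySem.Dict.keys_foldl_insert_key, PySem.Dict.keys_empty, PySem.Set.update_nil_left]
  have hkG : g.keys = PySem.Set.ofList (transitions.map (·.1)) := by
    rw [hg, PySem.Dict.keys_foldl_modify_key, PySem.Dict.keys_empty, PySem.Set.update_nil_left]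
  have hndA : dA.keys.Nodup := hkA ▸ PySem.Set.nodup_ofList _
  have hndG : g.keys.Nodup := hkG ▸ PySem.Set.nodup_ofList _
  have hgetG : ∀ c, g.getD c [] = (transitions.filter (fun p => p.1 == c)).map (·.2) := by
    intro c
    rw [hg, PySem.Dict.getD_foldl_modify_append, PySem.Dict.getD_empty]
    simp
  -- B's second pass appends fresh distinct keys
  rw [PySem.Dict.items_foldl_insert_fresh
        (k := fun q => q.1) (v := fun q => pvRender q.2)
        (d := PySem.Dict.empty) (l := g.items)
        (fun a _ => PySem.Dict.contains_empty _) (by exact hndG)]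
  rw [PySem.Dict.items_eq_map_keys dA hndA "", PySem.Dict.items_eq_map_keys g hndG []]
  rw [show (PySem.Dict.empty : PySem.Dict String String).items = [] from rfl, List.nil_append, List.map_map, hkA, hkG]
  apply List.map_congr_left
  intro c hc
  have hmem : c ∈ transitions.map (·.1) := (PySem.Set.mem_ofList _ _).mp hc
  have hval : dA.get? c = pvAccA none ((transitions.filter (fun p => p.1 == c)).map (·.2)) := by
    rw [hdA, pvGetA, PySem.Dict.get?_empty]
  have hne : (transitions.filter (fun p => p.1 == c)).map (·.2) ≠ [] := by
    rcases List.mem_map.mp hmem with ⟨p, hp, hpc⟩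
    simp only [ne_eq, List.map_eq_nil_iff, List.filter_eq_nil_iff, not_forall]
    exact ⟨p, hp, by simp [hpc]⟩
  rcases List.exists_cons_of_ne_nil hne with ⟨t0, ts, hts⟩
  simp only [Function.comp, hgetG c, hts, hval, pvAccA_none, pvRender,
    PySem.Dict.getD_eq_get?_getD, Option.getD_some]

-- ===== VERDICT (by name: the statement is the Claim_ definition above) =====
theorem combine_transitions_spec : Claim_equal_combine_transitions := by
  intro transitions _
  unfold Spec_combine_transitions
  exact combine_transitions_eq transitions
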